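-- pv_equiv track=rewrite | github.com/PhyloSofS-Team/thoraxe | exonhomology/subexons/phylosofs.py | get_exon2char
-- ===== SOURCE A (Python) =====
-- import string
--
-- CHARS = [
--     char for char in string.printable
--     if char not in {' ', '\t', '\n', '\r', '\x0b', '\x0c', '\\'}
-- ]
--
-- MAX_EXONS = len(CHARS)
--
-- def get_exon2char(exons):
--     """
--     Return a dictionary from orthologous exon group to a single character.
--
--     >>> result = exon2char(['1_0-1_1', '2_0'])
--     >>> sorted(result)
--     ['1_0', '1_1', '2_0']
--     >>> [result[exon] for exon in sorted(result)]
--     ['0', '1', '2']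
--     """
--     homologous_exons = {}
--     i = 0
--     for exon in exons:
--         for subexon in str(exon).split('-'):
--             if subexon not in homologous_exons:
--                 if i < MAX_EXONS:
--                     homologous_exons[subexon] = CHARS[i]
--                     i += 1
--                 else:
--                     raise Exception(
--                         'PhyloSofS can parse more than {} homologous exons.'.
--                         format(MAX_EXONS))
--     return homologous_exons
-- ===== SOURCE B (Python) =====
-- import string
--
-- CHARS = [
--     char for char in string.printable
--     if char not in {' ', '\t', '\n', '\r', '\x0b', '\x0c', '\\'}
-- ]
--
-- MAX_EXONS = len(CHARS)
--
--
-- def get_exon2char(exons):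
--     flat = [sub for exon in exons for sub in str(exon).split('-')]
--     order = sorted(set(flat), key=flat.index)
--     if len(order) > MAX_EXONS:
--         raise Exception(
--             'PhyloSofS can parse more than {} homologous exons.'.format(
--                 MAX_EXONS))
--     return {sub: CHARS[i] for i, sub in enumerate(order)}
-- ===== Notes on version B (the rewrite author's own statement) =====
-- stated objective: alternative
-- what changed: A's single stateful pass that interleaves a dict membership test with a running character counter is replaced by a sort-based strategy: flatten all subexons, take their set, sort it by first occurrence index (list.index) and map positions to characters.
import Mathlib
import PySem

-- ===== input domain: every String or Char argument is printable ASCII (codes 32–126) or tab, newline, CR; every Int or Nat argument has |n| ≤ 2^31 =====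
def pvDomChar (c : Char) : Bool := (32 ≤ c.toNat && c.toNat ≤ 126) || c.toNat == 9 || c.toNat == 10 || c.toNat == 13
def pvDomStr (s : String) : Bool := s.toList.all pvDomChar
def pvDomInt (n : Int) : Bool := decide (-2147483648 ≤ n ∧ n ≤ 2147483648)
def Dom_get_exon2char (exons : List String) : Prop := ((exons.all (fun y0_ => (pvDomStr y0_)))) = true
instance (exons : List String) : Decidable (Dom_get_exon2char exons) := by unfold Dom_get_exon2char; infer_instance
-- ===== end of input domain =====

-- B replaces A's single stateful membership-check-and-assign pass by a sort-based strategy: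
-- sort the set of subexons by first occurrence index, then map positions to characters (objective: alternative, same result).

-- shared module-level constants: CHARS (string.printable minus whitespace and backslash) and MAX_EXONS
def pvCHARS : List String :=
  "0123456789abcdefghijklmnopqrstuvwxyzABCDEFGHIJKLMNOPQRSTUVWXYZ!\"#$%&'()*+,-./:;<=>?@[]^_`{|}~".toList.map
    (fun c => String.ofList [c])

def pvMAX_EXONS : Nat := pvCHARS.length

-- str(exon).split('-'): sep is nonempty, so PySem.Str.split? never returns none
def pvSplit (s : String) : List String := (PySem.Str.split? s "-").getD []

-- ===== PORT A =====
-- the loop body of A: membership test, then capacity test, then assign CHARS[i] and bump i;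
-- in the 'else' branch the Python raises (excluded by Pre_): the port leaves the state unchanged
def pvStepA (st : PySem.Dict String String × Nat) (subexon : String) : PySem.Dict String String × Nat :=
  if st.1.contains subexon then st
  else if st.2 < pvMAX_EXONS then (st.1.insert subexon (PySem.List.pyGetD pvCHARS (st.2 : Int) ""), st.2 + 1)
  else st

def get_exon2char (exons : List String) : List (String × String) :=
  (exons.foldl (fun st exon => (pvSplit exon).foldl pvStepA st) (PySem.Dict.empty, 0)).1.items

-- ===== PORT B =====
-- flat.index(sub): every sub sorted here is an element of flat, so list.index never raises; getD 0 is unreachable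
def pvFirstIdx (flat : List String) (s : String) : Int := ((PySem.List.index? flat s).getD 0 : Int)

-- {sub: CHARS[i] for i, sub in enumerate(order)}
def pvEnumMap (order : List String) : List (String × String) :=
  (PySem.List.enumerate order).map (fun p => (p.2, PySem.List.pyGetD pvCHARS p.1 ""))

def get_exon2char_alt (exons : List String) : List (String × String) :=
  let flat := exons.flatMap pvSplit
  let order := PySem.List.sorted (PySem.Set.ofList flat) (pvFirstIdx flat) false
  -- if order.length > MAX_EXONS the Python raises (excluded by Pre_)
  pvEnumMap order

-- ===== PRECONDITION & SPEC =====
-- Pre_ excludes exactly the inputs with more than MAX_EXONS (= 93) distinct subexons,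
-- on which both A and B raise the same Exception.
def Pre_get_exon2char (exons : List String) : Prop :=
  (PySem.List.dedup (exons.flatMap (fun e => (PySem.Str.split? e "-").getD []))).length ≤ 93
instance (exons : List String) : Decidable (Pre_get_exon2char exons) := by unfold Pre_get_exon2char; infer_instance

def pvWitness_get_exon2char : List String := ["1_0-1_1", "2_0"]

def Spec_get_exon2char (exons : List String) (out : List (String × String)) : Prop := out = get_exon2char_alt exons
instance (exons : List String) (out : List (String × String)) : Decidable (Spec_get_exon2char exons out) := by unfold Spec_get_exon2char; infer_instance

-- ===== CLAIM (what is proved, stated in full; the proofs are below) =====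
def Claim_equal_get_exon2char : Prop := ∀ (exons : List String), Dom_get_exon2char exons → Pre_get_exon2char exons → Spec_get_exon2char exons (get_exon2char exons)

-- ===== LEMMAS AND PROOFS =====

theorem pvMAX_eq : pvMAX_EXONS = 93 := by decide

theorem pvEnumMap_keys (u : List String) :
    (pvEnumMap u).map (fun p => p.1) = u := by
  simp [pvEnumMap, List.map_map, Function.comp_def, PySem.List.map_snd_enumerate]

theorem pvContains_pvEnumMap (u : List String) (s : String) :
    (PySem.Dict.mk (pvEnumMap u)).contains s = decide (s ∈ u) := by
  rw [PySem.Dict.contains_eq_decide_mem_keys]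
  have : (PySem.Dict.mk (pvEnumMap u)).keys = u := by
    simpa [PySem.Dict.keys] using pvEnumMap_keys u
  rw [this]

theorem pvEnumMap_append_singleton (u : List String) (s : String) :
    pvEnumMap (u ++ [s]) = pvEnumMap u ++ [(s, PySem.List.pyGetD pvCHARS (u.length : Int) "")] := by
  simp [pvEnumMap, PySem.List.enumerate_append, PySem.List.enumerate]

theorem pvAdd_length_le {α : Type} [BEq α] [LawfulBEq α] (s : PySem.Set α) (x : α) :
    s.length ≤ (PySem.Set.add s x).length := by
  rw [PySem.Set.add_eq_ite]
  split <;> simp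

-- A-side loop invariant: A's fold over any flat list of subexons builds exactly the
-- ordered-dedup-then-enumerate dictionary, as long as the capacity is not exceeded
theorem pvInvariant (xs : List String) (h : (PySem.Set.ofList xs).length ≤ pvMAX_EXONS) :
    xs.foldl pvStepA (PySem.Dict.empty, 0) =
      (PySem.Dict.mk (pvEnumMap (PySem.Set.ofList xs)), (PySem.Set.ofList xs).length) := by
  induction xs using List.reverseRecOn with
  | nil => simp [PySem.Set.ofList, pvEnumMap, PySem.Dict.empty]
  | append_singleton ys s ih =>
    rw [PySem.Set.ofList_append_singleton] at h ⊢
    have hle : (PySem.Set.ofList ys).length ≤ pvMAX_EXONS :=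
      le_trans (pvAdd_length_le _ _) h
    rw [List.foldl_append, ih hle, List.foldl_cons, List.foldl_nil]
    by_cases hmem : s ∈ PySem.Set.ofList ys
    · rw [PySem.Set.add_of_mem hmem]
      simp only [pvStepA, pvContains_pvEnumMap]
      simp [hmem]
    · rw [PySem.Set.add_of_not_mem hmem] at h ⊢
      have hlt : (PySem.Set.ofList ys).length < pvMAX_EXONS := by
        simpa using h
      have hc : (PySem.Dict.mk (pvEnumMap (PySem.Set.ofList ys))).contains s = false := by
        rw [pvContains_pvEnumMap]
        simp [hmem]
      simp only [pvStepA, hc, Bool.false_eq_true, if_false, hlt, if_true]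
      refine Prod.ext ?_ (by simp)
      apply PySem.Dict.ext
      rw [PySem.Dict.items_insert_of_not_contains _ _ hc]
      simp [pvEnumMap_append_singleton]

-- B-side: the first-seen dedup list is strictly increasing in first occurrence index,
-- so sorting set(flat) by flat.index reproduces it
theorem pvPairwise_firstIdx (xs : List String) :
    (PySem.Set.ofList xs).Pairwise (fun a b => pvFirstIdx xs a < pvFirstIdx xs b) := by
  induction xs using List.reverseRecOn with
  | nil => simp [PySem.Set.ofList]
  | append_singleton ys s ih =>
    rw [PySem.Set.ofList_append_singleton]
    have hstable : ∀ a ∈ PySem.Set.ofList ys, pvFirstIdx (ys ++ [s]) a = pvFirstIdx ys a := by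
      intro a ha
      have ha' : a ∈ ys := (PySem.Set.mem_ofList ys a).1 ha
      simp only [pvFirstIdx]
      rw [PySem.List.index?_append_of_mem [s] ha']
    have hpw : (PySem.Set.ofList ys).Pairwise
        (fun a b => pvFirstIdx (ys ++ [s]) a < pvFirstIdx (ys ++ [s]) b) :=
      (List.pairwise_iff_forall_sublist).2 (by
        intro a b hsub
        have hmem := hsub.subset
        have ha : a ∈ PySem.Set.ofList ys := hmem (by simp)
        have hb : b ∈ PySem.Set.ofList ys := hmem (by simp)
        rw [hstable a ha, hstable b hb]
        exact (List.pairwise_iff_forall_sublist).1 ih hsub)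
    by_cases hmem : s ∈ PySem.Set.ofList ys
    · rw [PySem.Set.add_of_mem hmem]; exact hpw
    · rw [PySem.Set.add_of_not_mem hmem]
      have hs' : s ∉ ys := fun h => hmem ((PySem.Set.mem_ofList ys s).2 h)
      refine (List.pairwise_append).2 ⟨hpw, by simp, ?_⟩
      intro a ha b hb
      rw [List.mem_singleton] at hb
      rw [hb]
      have ha' : a ∈ ys := (PySem.Set.mem_ofList ys a).1 ha
      rw [hstable a ha]
      have hidxs : PySem.List.index? (ys ++ [s]) s = some ys.length :=
        PySem.List.index?_append_singleton_self _ _ hs'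
      obtain ⟨k, hk⟩ := Option.isSome_iff_exists.1 ((PySem.List.index?_isSome_iff ys a).2 ha')
      obtain ⟨hklt, -, -⟩ := PySem.List.getElem_of_index?_eq_some hk
      simp only [pvFirstIdx, hk, hidxs, Option.getD_some]
      exact_mod_cast hklt

theorem pvSorted_eq (flat : List String) :
    PySem.List.sorted (PySem.Set.ofList flat) (pvFirstIdx flat) false = PySem.Set.ofList flat :=
  PySem.List.sorted_eq_of_perm_of_pairwise_lt _ _ _ (List.Perm.refl _) (pvPairwise_firstIdx flat)

-- ===== VERDICT (by name: the statement is the Claim_ definition above) =====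
theorem get_exon2char_spec : Claim_equal_get_exon2char := by
  intro exons _ hpre
  unfold Spec_get_exon2char get_exon2char get_exon2char_alt
  have hflat : exons.foldl (fun st exon => (pvSplit exon).foldl pvStepA st) (PySem.Dict.empty, 0) =
      (exons.flatMap pvSplit).foldl pvStepA (PySem.Dict.empty, 0) := by
    rw [List.flatMap_def, List.foldl_flatten, List.foldl_map]
  rw [hflat]
  have hpre' : (PySem.Set.ofList (exons.flatMap pvSplit)).length ≤ pvMAX_EXONS := by
    rw [pvMAX_eq]
    simpa [Pre_get_exon2char, pvSplit, PySem.List.dedup_eq_ofList] using hpre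
  rw [pvInvariant _ hpre']
  simp [pvSorted_eq]
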